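-- pv_equiv track=rewrite | github.com/EdwardStables/AoC | year_2023/day_11/task.py | expanded_cols
-- ===== SOURCE A (Python) =====
-- def expanded_cols(data):
--     cols = []
--     for c in range(len(data[0])):
--         for row in data:
--             if row[c] == "#":
--                 break
--         else:
--             cols.append(c)
--
--     return cols
-- ===== SOURCE B (Python) =====
-- def expanded_cols(data):
--     width = len(data[0])
--     marked = set()
--     for row in data:
--         for c in range(width):
--             if row[c] == "#":
--                 marked.add(c)
--     return [c for c in range(width) if c not in marked]
-- ===== Notes on version B (the rewrite author's own statement) =====
-- stated objective: alternative
-- what changed: Replaces A's column-major scan (per column, inner row loop with early break/for-else) by a single row-major pass that collects all '#' columns into a set, then filters range(width) against it.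
-- outside the precondition, e.g. on expanded_cols(['.#', '#']): A returns [], B raises IndexError; on expanded_cols([]): A raises IndexError, B raises IndexError
import Mathlib
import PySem

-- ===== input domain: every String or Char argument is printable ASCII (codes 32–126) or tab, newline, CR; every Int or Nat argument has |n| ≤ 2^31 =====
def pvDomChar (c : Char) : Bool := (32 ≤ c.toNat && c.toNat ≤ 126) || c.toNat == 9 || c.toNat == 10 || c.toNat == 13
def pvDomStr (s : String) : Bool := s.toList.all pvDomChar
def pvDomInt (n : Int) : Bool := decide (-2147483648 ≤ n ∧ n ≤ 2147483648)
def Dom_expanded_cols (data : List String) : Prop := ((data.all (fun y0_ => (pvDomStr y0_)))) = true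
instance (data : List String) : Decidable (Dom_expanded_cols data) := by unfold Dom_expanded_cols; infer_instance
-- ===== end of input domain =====

-- B replaces A's column-major scan with an early break by one row-major pass that
-- collects the columns containing '#' into a set, then filters range(width).

-- ===== PORT A =====
-- inner 'for row in data: if row[c] == "#": break / else: append' loop:
-- returns true iff the loop broke ('#' seen at column c before any short row).
-- The 'none' arm is Python's IndexError, excluded by Pre_.
def aScan (c : Int) : List String → Bool
  | [] => false
  | r :: rs =>
    match PySem.Str.pyGet? r c with
    | some ch => if ch = '#' then true else aScan c rs
    | none => true

def expanded_cols (data : List String) : List Int :=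
  (PySem.List.pyRange 0 (PySem.Str.len (PySem.List.pyGetD data 0 "")) 1).foldl
    (fun cols c => if aScan c data then cols else cols ++ [c]) []

-- ===== PORT B =====
-- one row of B's pass: mark every column of this row that holds '#'
def bMark (width : Int) (marked : PySem.Set Int) (row : String) : PySem.Set Int :=
  (PySem.List.pyRange 0 width 1).foldl
    (fun m c =>
      match PySem.Str.pyGet? row c with
      | some ch => if ch = '#' then PySem.Set.add m c else m
      | none => m) marked

def expanded_cols_alt (data : List String) : List Int :=
  let width := PySem.Str.len (PySem.List.pyGetD data 0 "")
  let marked := data.foldl (bMark width) PySem.Set.empty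
  (PySem.List.pyRange 0 width 1).filter (fun c => !(PySem.Set.contains marked c))

-- ===== PRECONDITION & SPEC =====
-- Pre_ excludes empty data (A raises IndexError on data[0]) and ragged inputs with a
-- row shorter than the first row, where A's early break may skip the out-of-range
-- access (A can return there) while B's full pass raises IndexError.
def Pre_expanded_cols (data : List String) : Prop :=
  data ≠ [] ∧ ∀ r ∈ data, PySem.Str.len (data.headD "") ≤ PySem.Str.len r
instance (data : List String) : Decidable (Pre_expanded_cols data) := by
  unfold Pre_expanded_cols; infer_instance
def pvWitness_expanded_cols : List String := ["#.a", ".#b", "..c"]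

def Spec_expanded_cols (data : List String) (out : List Int) : Prop := out = expanded_cols_alt data
instance (data : List String) (out : List Int) : Decidable (Spec_expanded_cols data out) := by unfold Spec_expanded_cols; infer_instance

-- ===== CLAIM (what is proved, stated in full; the proofs are below) =====
def Claim_equal_expanded_cols : Prop := ∀ (data : List String), Dom_expanded_cols data → Pre_expanded_cols data → Spec_expanded_cols data (expanded_cols data)

-- ===== LEMMAS AND PROOFS =====

-- membership in one bMark pass
theorem mem_bMark (w : Int) (m : PySem.Set Int) (row : String) (x : Int) :
    x ∈ bMark w m row ↔
      x ∈ m ∨ (x ∈ PySem.List.pyRange 0 w 1 ∧ PySem.Str.pyGet? row x = some '#') := by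
  unfold bMark
  generalize PySem.List.pyRange 0 w 1 = l
  induction l generalizing m with
  | nil => simp
  | cons c cs ih =>
    simp only [List.foldl_cons, List.mem_cons]
    cases hg : PySem.Str.pyGet? row c with
    | none =>
      dsimp only
      rw [ih]
      constructor
      · rintro (h | h); · exact Or.inl h
        · exact Or.inr ⟨Or.inr h.1, h.2⟩
      · rintro (h | ⟨hc | hc, hh⟩)
        · exact Or.inl h
        · subst hc; rw [hg] at hh; exact absurd hh (by simp)
        · exact Or.inr ⟨hc, hh⟩
    | some ch =>
      dsimp only
      by_cases hch : ch = '#'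
      · subst hch
        rw [if_pos rfl, ih]
        simp only [PySem.Set.mem_add]
        constructor
        · rintro (⟨h | h⟩ | h)
          · exact Or.inl h
          · subst h; exact Or.inr ⟨Or.inl rfl, hg⟩
          · exact Or.inr ⟨Or.inr h.1, h.2⟩
        · rintro (h | ⟨hc | hc, hh⟩)
          · exact Or.inl (Or.inl h)
          · subst hc; exact Or.inl (Or.inr rfl)
          · exact Or.inr ⟨hc, hh⟩
      · rw [if_neg hch, ih]
        constructor
        · rintro (h | h); · exact Or.inl h
          · exact Or.inr ⟨Or.inr h.1, h.2⟩
        · rintro (h | ⟨hc | hc, hh⟩)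
          · exact Or.inl h
          · subst hc; rw [hg] at hh
            exact absurd (Option.some.inj hh) hch
          · exact Or.inr ⟨hc, hh⟩

-- membership in the whole marked set
theorem mem_marked (w : Int) (data : List String) (m : PySem.Set Int) (x : Int) :
    x ∈ data.foldl (bMark w) m ↔
      x ∈ m ∨ ∃ r ∈ data, x ∈ PySem.List.pyRange 0 w 1 ∧ PySem.Str.pyGet? r x = some '#' := by
  induction data generalizing m with
  | nil => simp
  | cons r rs ih =>
    simp only [List.foldl_cons]
    rw [ih, mem_bMark]
    constructor
    · rintro ((h | h) | ⟨r', hr', h⟩)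
      · exact Or.inl h
      · exact Or.inr ⟨r, List.mem_cons_self, h⟩
      · exact Or.inr ⟨r', List.mem_cons_of_mem _ hr', h⟩
    · rintro (h | ⟨r', hr', h⟩)
      · exact Or.inl (Or.inl h)
      · rcases List.mem_cons.1 hr' with h' | h'
        · subst h'; exact Or.inl (Or.inr h)
        · exact Or.inr ⟨r', h', h⟩

-- A's inner scan, under the rectangularity assumption
theorem aScan_iff (c : Int) (data : List String)
    (hin : ∀ r ∈ data, PySem.Str.pyGet? r c ≠ none) :
    aScan c data = true ↔ ∃ r ∈ data, PySem.Str.pyGet? r c = some '#' := by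
  induction data with
  | nil => simp [aScan]
  | cons r rs ih =>
    have hr : PySem.Str.pyGet? r c ≠ none := hin r List.mem_cons_self
    have hrs : ∀ r' ∈ rs, PySem.Str.pyGet? r' c ≠ none :=
      fun r' h => hin r' (List.mem_cons_of_mem _ h)
    simp only [aScan]
    cases hg : PySem.Str.pyGet? r c with
    | none => exact absurd hg hr
    | some ch =>
      dsimp only
      by_cases hch : ch = '#'
      · subst hch
        rw [if_pos rfl]
        constructor
        · intro _; exact ⟨r, List.mem_cons_self, hg⟩
        · intro _; rfl
      · rw [if_neg hch, ih hrs]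
        constructor
        · rintro ⟨r', hr', h⟩; exact ⟨r', List.mem_cons_of_mem _ hr', h⟩
        · rintro ⟨r', hr', h⟩
          rcases List.mem_cons.1 hr' with h' | h'
          · subst h'; rw [hg] at h
            exact absurd (Option.some.inj h) hch
          · exact ⟨r', h', h⟩

-- ===== VERDICT (by name: the statement is the Claim_ definition above) =====
theorem expanded_cols_spec : Claim_equal_expanded_cols := by
  intro data _ hpre
  obtain ⟨hne, hlen⟩ := hpre
  unfold Spec_expanded_cols expanded_cols expanded_cols_alt
  dsimp only
  set w := PySem.Str.len (PySem.List.pyGetD data 0 "") with hw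
  set marked := data.foldl (bMark w) PySem.Set.empty with hm
  have hhead : PySem.List.pyGetD data 0 "" = data.headD "" := by
    cases data with
    | nil => exact absurd rfl hne
    | cons a as => simp [PySem.List.pyGetD_zero]
  have key : ∀ c ∈ PySem.List.pyRange 0 w 1,
      aScan c data = PySem.Set.contains marked c := by
    intro c hc
    have hcr := (PySem.List.mem_pyRange_one).1 hc
    have hnone : ∀ r ∈ data, PySem.Str.pyGet? r c ≠ none := by
      intro r hr
      have hle : w ≤ PySem.Str.len r := hw ▸ hhead ▸ hlen r hr
      rw [PySem.Str.len_eq] at hle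
      have hc2 : c < (r.toList.length : Int) := by
        have h3 : r.toList.length = r.length := String.length_toList
        rw [h3]; omega
      simp only [PySem.Str.pyGet?_eq, PySem.Chars.pyGet?_eq_listPyGet?]
      intro hcontra
      rw [PySem.List.pyGet?_eq_none_iff] at hcontra
      apply hcontra
      constructor <;> omega
    have h1 := aScan_iff c data hnone
    have h2 : PySem.Set.contains marked c = true ↔
        ∃ r ∈ data, PySem.Str.pyGet? r c = some '#' := by
      rw [PySem.Set.contains_iff, hm, mem_marked]
      constructor
      · rintro (h | ⟨r, hr, _, hh⟩)
        · exact absurd h (by simp [PySem.Set.empty])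
        · exact ⟨r, hr, hh⟩
      · rintro ⟨r, hr, hh⟩
        exact Or.inr ⟨r, hr, hc, hh⟩
    exact Bool.eq_iff_iff.mpr (h1.trans h2.symm)
  calc (PySem.List.pyRange 0 w 1).foldl
          (fun cols c => if aScan c data then cols else cols ++ [c]) []
      = (PySem.List.pyRange 0 w 1).foldl
          (fun cols c => if (!PySem.Set.contains marked c) = true then cols ++ [c] else cols) [] := by
        apply PySem.List.foldl_congr_mem
        intro acc x hx
        rw [key x hx]
        cases PySem.Set.contains marked x <;> simp
    _ = [] ++ (PySem.List.pyRange 0 w 1).filter (fun c => !PySem.Set.contains marked c) :=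
        PySem.List.foldl_append_if_eq_filter _ _ _
    _ = (PySem.List.pyRange 0 w 1).filter (fun c => !PySem.Set.contains marked c) :=
        List.nil_append _
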